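-- pv_equiv track=rewrite | github.com/mgilramo/AdventOfCode2021 | aoc_day10.py | closing_char
-- ===== SOURCE A (Python) =====
-- class ChunkChar:
--     d_open_char = {')': '(',
--                    ']': '[',
--                    '}': '{',
--                    '>': '<'}
--
--     d_close_char = {'(': ')',
--                     '[': ']',
--                     '{': '}',
--                     '<': '>'}
--
--     def __init__(self, open_char, position):
--         self.open_char = open_char
--         self.position = position
--         self.opened = True
--
--     def close(self):
--         self.opened = False
--
--     def __str__(self):
--         return f'Open char: {self.open_char} - Opened: {self.opened} - Position: {self.position}'
--
-- def closing_char(line):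
--     chunk_list = []
--     for pos in range(len(line)):
--         if line[pos] in '([{<':
--             chunk = ChunkChar(line[pos], pos)
--             chunk_list.append(chunk)
--         elif line[pos] in ')]}>':
--             open_chunks = list(filter(lambda c: c.opened, chunk_list))
--             open_chunks_sorted = list(sorted(open_chunks, key=lambda s: s.position, reverse=True))
--             open_chunks_sorted[0].close()
--     open_chunks = list(filter(lambda c: c.opened, chunk_list))
--     open_chunks_sorted_final = list(sorted(open_chunks, key=lambda s: s.position, reverse=True))
--     return_list = list(map(lambda r: ChunkChar.d_close_char[r.open_char], open_chunks_sorted_final))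
--     return return_list
-- ===== SOURCE B (Python) =====
-- def closing_char(line):
--     pairs = {'(': ')', '[': ']', '{': '}', '<': '>'}
--     stack = []
--     for ch in line:
--         if ch in pairs:
--             stack.append(ch)
--         elif ch in ')]}>':
--             stack.pop()
--     return [pairs[ch] for ch in reversed(stack)]
-- ===== Notes on version B (the rewrite author's own statement) =====
-- stated objective: simpler
-- what changed: Replace the chunk-object list with a per-closing-char filter+sort pass by a single stack pass: push opening chars, pop on closing chars, then map the reversed remainder to closing chars.
import Mathlib
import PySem

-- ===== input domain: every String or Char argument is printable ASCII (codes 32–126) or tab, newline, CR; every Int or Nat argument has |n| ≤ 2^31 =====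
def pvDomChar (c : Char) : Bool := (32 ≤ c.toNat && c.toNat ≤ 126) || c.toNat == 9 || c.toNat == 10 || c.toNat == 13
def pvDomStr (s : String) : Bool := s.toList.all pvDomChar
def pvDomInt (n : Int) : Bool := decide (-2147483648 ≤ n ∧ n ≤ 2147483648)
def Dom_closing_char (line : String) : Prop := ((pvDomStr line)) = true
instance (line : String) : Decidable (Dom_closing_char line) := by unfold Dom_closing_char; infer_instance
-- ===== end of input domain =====

-- B replaces A's per-closing-char filter+sort over a list of chunk objects by a single
-- stack pass (push opens, pop on close, map reversed remainder); objective: simpler.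

-- ===== PORT A =====
-- A ChunkChar object is ported as (open_char, position, opened).
-- d_close_char[c]: KeyError is unreachable (only chars of '([{<' are stored); "" stands for it.
def dCloseChar (c : Char) : String :=
  if c = '(' then ")" else if c = '[' then "]"
  else if c = '{' then "}" else if c = '<' then ">" else ""

-- one iteration of A's `for pos in range(len(line))` body; closing mutates the unique
-- opened chunk of maximal position (aliasing rendered via the position, unique per chunk)
def chunkStep (st : List (Char × Nat × Bool)) (pos : Nat) (c : Char) :
    List (Char × Nat × Bool) :=
  if c ∈ ("([{<" : String).toList then st ++ [(c, pos, true)]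
  else if c ∈ (")]}>" : String).toList then
    match PySem.List.sorted (st.filter (fun e => e.2.2)) (fun e => e.2.1) true with
    | [] => st            -- Python raises IndexError here; Pre_closing_char excludes it
    | m :: _ => st.map (fun e => if e.2.1 = m.2.1 then (e.1, e.2.1, false) else e)
  else st

def chunkLoop : List Char → Nat → List (Char × Nat × Bool) → List (Char × Nat × Bool)
  | [], _, st => st
  | c :: rest, pos, st => chunkLoop rest (pos + 1) (chunkStep st pos c)

def closing_char (line : String) : List String :=
  let chunk_list := chunkLoop line.toList 0 []
  let open_chunks := chunk_list.filter (fun e => e.2.2)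
  let open_chunks_sorted_final := PySem.List.sorted open_chunks (fun e => e.2.1) true
  open_chunks_sorted_final.map (fun r => dCloseChar r.1)

-- ===== PORT B =====
def pvPairs : PySem.Dict Char String :=
  PySem.Dict.ofList [('(', ")"), ('[', "]"), ('{', "}"), ('<', ">")]

def closing_char_alt (line : String) : List String :=
  let stack := line.toList.foldl (fun st ch =>
    if pvPairs.contains ch then st ++ [ch]
    else if ch ∈ (")]}>" : String).toList then st.dropLast   -- stack.pop(); empty stack raises, excluded by Pre_
    else st) []
  stack.reverse.map (fun ch => pvPairs.getD ch "")   -- pairs[ch]; KeyError unreachable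

-- ===== PRECONDITION & SPEC =====
-- Pre_ excludes exactly the lines on which A raises IndexError (a closing bracket with no
-- chunk still open, i.e. some prefix has more closing than opening brackets); B raises there too.
def Pre_closing_char (line : String) : Prop :=
  ∀ n ∈ List.range (line.toList.length + 1),
    (line.toList.take n).countP (fun c => c ∈ (")]}>" : String).toList) ≤
      (line.toList.take n).countP (fun c => c ∈ ("([{<" : String).toList)
instance (line : String) : Decidable (Pre_closing_char line) := by
  unfold Pre_closing_char; infer_instance

def pvWitness_closing_char : String := "{[(<x>)]"

def Spec_closing_char (line : String) (out : List String) : Prop := out = closing_char_alt line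
instance (line : String) (out : List String) : Decidable (Spec_closing_char line out) := by
  unfold Spec_closing_char; infer_instance

-- ===== CLAIM (what is proved, stated in full; the proofs are below) =====
def Claim_equal_closing_char : Prop :=
  ∀ (line : String), Dom_closing_char line → Pre_closing_char line →
    Spec_closing_char line (closing_char line)


-- ===== LEMMAS AND PROOFS =====

lemma pvToL : ("([{<" : String).toList = ['(', '[', '{', '<'] := rfl

lemma pvPairs_mk : pvPairs = PySem.Dict.mk [('(', ")"), ('[', "]"), ('{', "}"), ('<', ">")] := rfl

lemma pvContains (c : Char) :
    pvPairs.contains c = decide (c ∈ ("([{<" : String).toList) := by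
  rw [pvToL, pvPairs_mk, PySem.Dict.contains_mk]
  by_cases h1 : c = '(' <;> by_cases h2 : c = '[' <;> by_cases h3 : c = '{' <;>
    by_cases h4 : c = '<' <;> simp [h1, h2, h3, h4] <;>
    exact ⟨fun h => h1 h.symm, fun h => h2 h.symm, fun h => h3 h.symm, fun h => h4 h.symm⟩

lemma pvGetD_eq (c : Char) (h : c ∈ ("([{<" : String).toList) :
    pvPairs.getD c "" = dCloseChar c := by
  rw [pvToL] at h
  fin_cases h <;> rfl

-- filtering the opened chunks after A's close-mutation = dropping the closed position
lemma absA_map_close (st : List (Char × Nat × Bool)) (p : Nat) :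
    ((st.map (fun e => if e.2.1 = p then (e.1, e.2.1, false) else e)).filter
        (fun e => e.2.2))
      = (st.filter (fun e => e.2.2)).filter (fun e => !(e.2.1 == p)) := by
  induction st with
  | nil => rfl
  | cons a st ih =>
    obtain ⟨x, q, b⟩ := a
    by_cases hq : q = p <;> cases b <;> simp [hq, ih]

lemma filter_ne_concat (l : List (Char × Nat × Bool)) (m : Char × Nat × Bool)
    (h : ∀ a ∈ l, a.2.1 < m.2.1) :
    (l ++ [m]).filter (fun e => !(e.2.1 == m.2.1)) = l := by
  rw [List.filter_append]
  have hl : l.filter (fun e => !(e.2.1 == m.2.1)) = l :=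
    List.filter_eq_self.mpr (fun a ha => by simp [Nat.ne_of_lt (h a ha)])
  simp [hl]

-- the loop invariant: B's stack is the open-char column of A's opened chunks, which are
-- listed in strictly increasing position order below the loop counter
lemma loop_corr (cs : List Char) : ∀ (pos : Nat) (st : List (Char × Nat × Bool)),
    ((st.filter (fun e => e.2.2)).Pairwise (fun a b => a.2.1 < b.2.1)) →
    (∀ e ∈ st.filter (fun e => e.2.2), e.2.1 < pos) →
    (∀ e ∈ st.filter (fun e => e.2.2), e.1 ∈ ("([{<" : String).toList) →
    (cs.foldl (fun st ch =>
        if pvPairs.contains ch then st ++ [ch]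
        else if ch ∈ (")]}>" : String).toList then st.dropLast
        else st) ((st.filter (fun e => e.2.2)).map (fun e => e.1)) =
      ((chunkLoop cs pos st).filter (fun e => e.2.2)).map (fun e => e.1))
    ∧ ((chunkLoop cs pos st).filter (fun e => e.2.2)).Pairwise (fun a b => a.2.1 < b.2.1)
    ∧ (∀ e ∈ (chunkLoop cs pos st).filter (fun e => e.2.2),
        e.1 ∈ ("([{<" : String).toList) := by
  induction cs with
  | nil => intro pos st h1 h2 h3; exact ⟨rfl, h1, h3⟩
  | cons c cs ih =>
    intro pos st h1 h2 h3
    rw [show chunkLoop (c :: cs) pos st = chunkLoop cs (pos + 1) (chunkStep st pos c) from rfl,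
        List.foldl_cons]
    by_cases hopen : c ∈ ("([{<" : String).toList
    · have hopenD : c = '(' ∨ c = '[' ∨ c = '{' ∨ c = '<' := by simpa [pvToL] using hopen
      have hstep : chunkStep st pos c = st ++ [(c, pos, true)] := by
        simp [chunkStep, hopenD]
      have hfilter : (st ++ [(c, pos, true)]).filter (fun e => e.2.2)
          = st.filter (fun e => e.2.2) ++ [(c, pos, true)] := by
        simp
      have h1' : (((st ++ [(c, pos, true)]).filter (fun e => e.2.2)).Pairwise
          (fun a b => a.2.1 < b.2.1)) := by
        rw [hfilter]
        refine List.pairwise_append.mpr ⟨h1, by simp, ?_⟩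
        intro a ha b hb
        simp at hb
        rw [hb]
        exact h2 a ha
      have h2' : ∀ e ∈ (st ++ [(c, pos, true)]).filter (fun e => e.2.2),
          e.2.1 < pos + 1 := by
        rw [hfilter]; intro e he
        rcases List.mem_append.mp he with he | he
        · exact Nat.lt_succ_of_lt (h2 e he)
        · simp at he; rw [he]; exact Nat.lt_succ_self pos
      have h3' : ∀ e ∈ (st ++ [(c, pos, true)]).filter (fun e => e.2.2),
          e.1 ∈ ("([{<" : String).toList := by
        rw [hfilter]; intro e he
        rcases List.mem_append.mp he with he | he
        · exact h3 e he
        · simp at he; rw [he]; exact hopen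
      have := ih (pos + 1) (st ++ [(c, pos, true)]) h1' h2' h3'
      rw [hstep]
      refine ⟨?_, this.2.1, this.2.2⟩
      rw [← this.1, pvContains]
      simp [hopenD, hfilter]
    · have hopenD : ¬(c = '(' ∨ c = '[' ∨ c = '{' ∨ c = '<') := by simpa [pvToL] using hopen
      by_cases hclose : c ∈ (")]}>" : String).toList
      · have hcloseD : c = ')' ∨ c = ']' ∨ c = '}' ∨ c = '>' := by
          simpa [show (")]}>" : String).toList = [')', ']', '}', '>'] from rfl] using hclose
        rcases List.eq_nil_or_concat (st.filter (fun e => e.2.2)) with hos | ⟨l, m, hos⟩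
        · -- no opened chunk: Python would raise; both ports leave the state unchanged
          have hstep : chunkStep st pos c = st := by
            simp [chunkStep, hopenD, hcloseD, hos,
              show PySem.List.sorted ([] : List (Char × Nat × Bool)) (fun e => e.2.1) true
                = [] from rfl]
          have := ih (pos + 1) st h1 (fun e he => Nat.lt_succ_of_lt (h2 e he)) h3
          rw [hstep]
          refine ⟨?_, this.2.1, this.2.2⟩
          rw [← this.1, pvContains]
          simp [hopenD, hcloseD, hos]
        · rw [List.concat_eq_append] at hos
          have hpw := h1; rw [hos] at hpw
          have hlm : ∀ a ∈ l, a.2.1 < m.2.1 := by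
            intro a ha
            exact (List.pairwise_append.mp hpw).2.2 a ha m (by simp)
          have hpl : l.Pairwise (fun a b => a.2.1 < b.2.1) :=
            (List.pairwise_append.mp hpw).1
          have hsort : PySem.List.sorted (st.filter (fun e => e.2.2))
              (fun e => e.2.1) true = m :: l.reverse := by
            apply PySem.List.sorted_rev_eq_of_perm_of_pairwise_gt
            · rw [hos, show m :: l.reverse = (l ++ [m]).reverse by simp]
              exact List.reverse_perm _
            · refine List.pairwise_cons.mpr ⟨?_, ?_⟩
              · intro a ha; exact hlm a (List.mem_reverse.mp ha)
              · exact List.pairwise_reverse.mpr hpl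
          have hstep : chunkStep st pos c
              = st.map (fun e => if e.2.1 = m.2.1 then (e.1, e.2.1, false) else e) := by
            simp [chunkStep, hopenD, hcloseD, hsort]
          have habs : ((st.map (fun e => if e.2.1 = m.2.1 then (e.1, e.2.1, false) else e)).filter
              (fun e => e.2.2)) = l := by
            rw [absA_map_close, hos, filter_ne_concat l m hlm]
          have h2l : ∀ e ∈ l, e.2.1 < pos + 1 := by
            intro e he
            exact Nat.lt_succ_of_lt (h2 e (by rw [hos]; exact List.mem_append_left _ he))
          have h3l : ∀ e ∈ l, e.1 ∈ ("([{<" : String).toList := by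
            intro e he
            exact h3 e (by rw [hos]; exact List.mem_append_left _ he)
          have := ih (pos + 1)
            (st.map (fun e => if e.2.1 = m.2.1 then (e.1, e.2.1, false) else e))
            (by rw [habs]; exact hpl) (by rw [habs]; exact h2l) (by rw [habs]; exact h3l)
          rw [hstep]
          refine ⟨?_, this.2.1, this.2.2⟩
          rw [← this.1, pvContains, habs, hos, List.map_append]
          simp [hopenD, hcloseD, List.dropLast_concat]
      · have hcloseD : ¬(c = ')' ∨ c = ']' ∨ c = '}' ∨ c = '>') := by
          simpa [show (")]}>" : String).toList = [')', ']', '}', '>'] from rfl] using hclose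
        have hstep : chunkStep st pos c = st := by
          simp [chunkStep, hopenD, hcloseD]
        have := ih (pos + 1) st h1 (fun e he => Nat.lt_succ_of_lt (h2 e he)) h3
        rw [hstep]
        refine ⟨?_, this.2.1, this.2.2⟩
        rw [← this.1, pvContains]
        simp [hopenD, hcloseD]

-- ===== VERDICT (by name: the statement is the Claim_ definition above) =====
theorem closing_char_spec : Claim_equal_closing_char := by
  unfold Claim_equal_closing_char
  intro line _hdom _hpre
  unfold Spec_closing_char
  obtain ⟨hfold, hpw, hmem⟩ :=
    loop_corr line.toList 0 [] (by simp) (by simp) (by simp)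
  simp only [closing_char, closing_char_alt]
  have hsort : PySem.List.sorted ((chunkLoop line.toList 0 []).filter (fun e => e.2.2))
      (fun e => e.2.1) true
      = ((chunkLoop line.toList 0 []).filter (fun e => e.2.2)).reverse :=
    PySem.List.sorted_rev_eq_of_perm_of_pairwise_gt _ _ _ (List.reverse_perm _)
      (List.pairwise_reverse.mpr hpw)
  rw [hsort]
  have hfold' : line.toList.foldl (fun st ch =>
      if pvPairs.contains ch then st ++ [ch]
      else if ch ∈ (")]}>" : String).toList then st.dropLast
      else st) []
      = ((chunkLoop line.toList 0 []).filter (fun e => e.2.2)).map (fun e => e.1) := hfold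
  rw [hfold', ← List.map_reverse, List.map_map]
  apply List.map_congr_left
  intro e he
  exact (pvGetD_eq e.1 (hmem e (List.mem_reverse.mp he))).symm
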